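-- pv_equiv track=rewrite | github.com/rodionvolovik/npuzzle | parsing_utilities.py | generate_goal_puzzle
-- ===== SOURCE A (Python) =====
-- def generate_goal_puzzle(size):
--     k = size ** 2
--     matrix_goal = [[0 for i in range(size)] for j in range(size)]
--     elements_position = k * [[None, None]]
--     # Fills column sequence
--     def fill_row(row, col, flag, num):
--         i = col
--         while i in range(size) and matrix_goal[row][i] == 0:
--             matrix_goal[row][i] = num
--             elements_position[num - 1] = [row, i]
--             num = num + 1
--             i = i + flag
--         if num > k:
--             return
--         if flag == 1:
--             fill_col(row + 1, i - 1, 1, num)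
--         else:
--             fill_col(row - 1, i + 1, -1, num)
--     # Fills row sequence
--     def fill_col(row, column, flag, num):
--         i = row
--         while i in range(size) and matrix_goal[i][column] == 0:
--             matrix_goal[i][column] = num
--             elements_position[num - 1] = [i, column]
--             num = num + 1
--             i = i + flag
--         if num > k:
--             return
--         if flag == -1:
--             fill_row(i + 1, column + 1,  1, num)
--         else:
--             fill_row(i - 1, column - 1,  -1, num)
--     fill_row(0, 0, 1, 1)
--     matrix_goal[elements_position[k - 1][0]][elements_position[k - 1][1]] = 0
--     puzzle = []
--     for i in range(size):
--         for j in range(size):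
--             puzzle.append(matrix_goal[i][j])
--     return puzzle
-- ===== SOURCE B (Python) =====
-- def generate_goal_puzzle(size):
--     n = size
--     grid = [[0] * n for _ in range(n)]
--     top, bottom, left, right = 0, n - 1, 0, n - 1
--     num = 1
--     while top <= bottom and left <= right:
--         for j in range(left, right + 1):
--             grid[top][j] = num
--             num += 1
--         for i in range(top + 1, bottom + 1):
--             grid[i][right] = num
--             num += 1
--         if top < bottom:
--             for j in range(right - 1, left - 1, -1):
--                 grid[bottom][j] = num
--                 num += 1
--         if left < right:
--             for i in range(bottom - 1, top, -1):
--                 grid[i][left] = num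
--                 num += 1
--         top += 1
--         bottom -= 1
--         left += 1
--         right -= 1
--     k = n * n
--     return [0 if grid[i][j] == k else grid[i][j] for i in range(n) for j in range(n)]
-- ===== Notes on version B (the rewrite author's own statement) =====
-- stated objective: idiomatic
-- what changed: Replaces A's mutual recursion (fill_row/fill_col scanning cell-by-cell while entries are still zero, recording every element's position to find the blank) with the standard iterative layer-peeling spiral: four bounds-driven for-loops per layer over shrinking top/bottom/left/right bounds (no per-cell zero tests, no recursion, no positions list), the blank cell found by value (== size*size).
-- outside the precondition, e.g. on generate_goal_puzzle(0): A raises IndexError, B returns []; on generate_goal_puzzle(-2): A raises RecursionError, B returns []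
import Mathlib
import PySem

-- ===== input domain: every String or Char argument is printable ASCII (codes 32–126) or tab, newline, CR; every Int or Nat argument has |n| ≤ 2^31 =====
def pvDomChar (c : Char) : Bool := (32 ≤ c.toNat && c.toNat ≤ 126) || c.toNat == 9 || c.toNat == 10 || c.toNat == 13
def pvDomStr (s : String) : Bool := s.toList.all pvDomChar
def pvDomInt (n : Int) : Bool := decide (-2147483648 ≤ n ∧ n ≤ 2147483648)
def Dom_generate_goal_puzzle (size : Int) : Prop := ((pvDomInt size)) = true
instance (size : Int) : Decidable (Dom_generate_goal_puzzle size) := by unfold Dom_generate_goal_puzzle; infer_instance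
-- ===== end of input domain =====

-- B replaces A's mutual recursion over zero-cell scans with the standard iterative
-- layer-peeling spiral (bounds-driven loops, blank found by value); same O(n^2) cost.
-- Both ports represent the mutable size×size matrix as a total function (row, col) ↦ value
-- (all reads/writes the Pythons perform on admitted inputs are at in-range, non-negative
-- indices, where this is exact), and A's elements_position list as a function index ↦
-- Option (row, col) (entries still [None, None] are none; only index k-1 is ever read).

-- ===== PORT A =====
def pvMSet (m : Int → Int → Int) (r c v : Int) : Int → Int → Int :=
  fun a b => if a = r ∧ b = c then v else m a b

def pvPSet (p : Int → Option (Int × Int)) (idx : Int) (rc : Int × Int) : Int → Option (Int × Int) :=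
  fun a => if a = idx then some rc else p a

-- the `while i in range(size) and matrix_goal[row][i] == 0` loop of fill_row
-- (fuel strictly exceeds the ≤ size iterations any scan performs; exhaustion never reached)
def pvRowScan (size : Int) : Nat → (Int → Int → Int) → (Int → Option (Int × Int)) →
    Int → Int → Int → Int → ((Int → Int → Int) × (Int → Option (Int × Int)) × Int × Int)
  | 0, mat, pos, _, i, _, num => (mat, pos, i, num)
  | fuel + 1, mat, pos, row, i, flag, num =>
    if 0 ≤ i ∧ i < size ∧ mat row i = 0 then
      pvRowScan size fuel (pvMSet mat row i num) (pvPSet pos (num - 1) (row, i)) row (i + flag) flag (num + 1)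
    else (mat, pos, i, num)

-- the `while i in range(size) and matrix_goal[i][column] == 0` loop of fill_col
def pvColScan (size : Int) : Nat → (Int → Int → Int) → (Int → Option (Int × Int)) →
    Int → Int → Int → Int → ((Int → Int → Int) × (Int → Option (Int × Int)) × Int × Int)
  | 0, mat, pos, _, i, _, num => (mat, pos, i, num)
  | fuel + 1, mat, pos, column, i, flag, num =>
    if 0 ≤ i ∧ i < size ∧ mat i column = 0 then
      pvColScan size fuel (pvMSet mat i column num) (pvPSet pos (num - 1) (i, column)) column (i + flag) flag (num + 1)
    else (mat, pos, i, num)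

-- fill_row / fill_col (mutually recursive; fuel strictly exceeds the ≤ 2·size+2 leg calls
-- any admitted run performs, so exhaustion is never reached inside Pre_)
mutual
def pvFillRow (size k : Int) : Nat → (Int → Int → Int) → (Int → Option (Int × Int)) →
    Int → Int → Int → Int → ((Int → Int → Int) × (Int → Option (Int × Int)))
  | 0, mat, pos, _, _, _, _ => (mat, pos)
  | fuel + 1, mat, pos, row, col, flag, num =>
    let st := pvRowScan size (size.toNat + 1) mat pos row col flag num
    if st.2.2.2 > k then (st.1, st.2.1)
    else if flag = 1 then pvFillCol size k fuel st.1 st.2.1 (row + 1) (st.2.2.1 - 1) 1 st.2.2.2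
    else pvFillCol size k fuel st.1 st.2.1 (row - 1) (st.2.2.1 + 1) (-1) st.2.2.2

def pvFillCol (size k : Int) : Nat → (Int → Int → Int) → (Int → Option (Int × Int)) →
    Int → Int → Int → Int → ((Int → Int → Int) × (Int → Option (Int × Int)))
  | 0, mat, pos, _, _, _, _ => (mat, pos)
  | fuel + 1, mat, pos, row, column, flag, num =>
    let st := pvColScan size (size.toNat + 1) mat pos column row flag num
    if st.2.2.2 > k then (st.1, st.2.1)
    else if flag = -1 then pvFillRow size k fuel st.1 st.2.1 (st.2.2.1 + 1) (column + 1) 1 st.2.2.2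
    else pvFillRow size k fuel st.1 st.2.1 (st.2.2.1 - 1) (column - 1) (-1) st.2.2.2
end

def generate_goal_puzzle (size : Int) : List Int :=
  let k := size ^ 2
  let mat0 : Int → Int → Int := fun _ _ => 0
  let pos0 : Int → Option (Int × Int) := fun _ => none
  let st := pvFillRow size k (2 * size.toNat + 4) mat0 pos0 0 0 1 1
  let mat :=
    match st.2 (k - 1) with
    | some rc => pvMSet st.1 rc.1 rc.2 0
    | none => st.1   -- Python raises here (only size ≤ 0); excluded by Pre_
  (PySem.List.pyRange 0 size 1).flatMap (fun i =>
    (PySem.List.pyRange 0 size 1).map (fun j => mat i j))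

-- ===== PORT B =====
-- the `while top <= bottom and left <= right` loop of Source B
-- (fuel strictly exceeds the ≤ ⌈size/2⌉ iterations; exhaustion never reached)
def pvSpiralLoop : Nat → Int → Int → Int → Int → Int → (Int → Int → Int) → (Int → Int → Int)
  | 0, _, _, _, _, _, mat => mat
  | fuel + 1, t, b, l, r, num, mat =>
    if t ≤ b ∧ l ≤ r then
      let s1 := (PySem.List.pyRange l (r + 1) 1).foldl
        (fun (p : (Int → Int → Int) × Int) j => (pvMSet p.1 t j p.2, p.2 + 1)) (mat, num)
      let s2 := (PySem.List.pyRange (t + 1) (b + 1) 1).foldl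
        (fun (p : (Int → Int → Int) × Int) i => (pvMSet p.1 i r p.2, p.2 + 1)) s1
      let s3 := if t < b then (PySem.List.pyRange (r - 1) (l - 1) (-1)).foldl
        (fun (p : (Int → Int → Int) × Int) j => (pvMSet p.1 b j p.2, p.2 + 1)) s2 else s2
      let s4 := if l < r then (PySem.List.pyRange (b - 1) t (-1)).foldl
        (fun (p : (Int → Int → Int) × Int) i => (pvMSet p.1 i l p.2, p.2 + 1)) s3 else s3
      pvSpiralLoop fuel (t + 1) (b - 1) (l + 1) (r - 1) s4.2 s4.1
    else mat

def generate_goal_puzzle_alt (size : Int) : List Int :=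
  let n := size
  let mat := pvSpiralLoop (n.toNat + 1) 0 (n - 1) 0 (n - 1) 1 (fun _ _ => 0)
  let k := n * n
  (PySem.List.pyRange 0 n 1).flatMap (fun i =>
    (PySem.List.pyRange 0 n 1).map (fun j => if mat i j = k then 0 else mat i j))

-- ===== PRECONDITION & SPEC =====
-- Pre_ excludes size ≤ 0, where A raises: IndexError at size = 0 (elements_position[-1]
-- on an empty list), unbounded mutual recursion (RecursionError) for negative size.
def Pre_generate_goal_puzzle (size : Int) : Prop := 1 ≤ size
instance (size : Int) : Decidable (Pre_generate_goal_puzzle size) := by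
  unfold Pre_generate_goal_puzzle; infer_instance

def pvWitness_generate_goal_puzzle : Int := 3

def Spec_generate_goal_puzzle (size : Int) (out : List Int) : Prop := out = generate_goal_puzzle_alt size
instance (size : Int) (out : List Int) : Decidable (Spec_generate_goal_puzzle size out) := by
  unfold Spec_generate_goal_puzzle; infer_instance

-- ===== CLAIM (what is proved, stated in full; the proofs are below) =====
def Claim_equal_generate_goal_puzzle : Prop := ∀ (size : Int), Dom_generate_goal_puzzle size → Pre_generate_goal_puzzle size → Spec_generate_goal_puzzle size (generate_goal_puzzle size)

-- ===== LEMMAS AND PROOFS =====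

-- Matrix/position overrides written by one leg of the spiral (the common value of
-- one of A's scans and of the corresponding fold of B).
def segH (mat : Int → Int → Int) (t l r num : Int) : Int → Int → Int :=
  fun i j => if i = t ∧ l ≤ j ∧ j ≤ r then num + (j - l) else mat i j
def segHrev (mat : Int → Int → Int) (t l r num : Int) : Int → Int → Int :=
  fun i j => if i = t ∧ l ≤ j ∧ j ≤ r then num + (r - j) else mat i j
def segV (mat : Int → Int → Int) (c t b num : Int) : Int → Int → Int :=
  fun i j => if j = c ∧ t ≤ i ∧ i ≤ b then num + (i - t) else mat i j
def segVrev (mat : Int → Int → Int) (c t b num : Int) : Int → Int → Int :=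
  fun i j => if j = c ∧ t ≤ i ∧ i ≤ b then num + (b - i) else mat i j
def posH (pos : Int → Option (Int × Int)) (t l r num : Int) : Int → Option (Int × Int) :=
  fun v => if num - 1 ≤ v ∧ v ≤ num - 1 + (r - l) then some (t, l + (v - (num - 1))) else pos v
def posHrev (pos : Int → Option (Int × Int)) (t l r num : Int) : Int → Option (Int × Int) :=
  fun v => if num - 1 ≤ v ∧ v ≤ num - 1 + (r - l) then some (t, r - (v - (num - 1))) else pos v
def posV (pos : Int → Option (Int × Int)) (c t b num : Int) : Int → Option (Int × Int) :=
  fun v => if num - 1 ≤ v ∧ v ≤ num - 1 + (b - t) then some (t + (v - (num - 1)), c) else pos v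
def posVrev (pos : Int → Option (Int × Int)) (c t b num : Int) : Int → Option (Int × Int) :=
  fun v => if num - 1 ≤ v ∧ v ≤ num - 1 + (b - t) then some (b - (v - (num - 1)), c) else pos v

lemma segH_empty (mat : Int → Int → Int) (t l r num : Int) (h : r < l) : segH mat t l r num = mat := by
  funext i j; simp only [segH]; split_ifs with h1
  · omega
  · rfl
lemma segV_empty (mat : Int → Int → Int) (c t b num : Int) (h : b < t) : segV mat c t b num = mat := by
  funext i j; simp only [segV]; split_ifs with h1
  · omega
  · rfl
lemma segVrev_empty (mat : Int → Int → Int) (c t b num : Int) (h : b < t) : segVrev mat c t b num = mat := by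
  funext i j; simp only [segVrev]; split_ifs with h1
  · omega
  · rfl


lemma segH_step (mat : Int → Int → Int) (t l r num : Int) (h : l ≤ r) :
    segH (pvMSet mat t l num) t (l + 1) r (num + 1) = segH mat t l r num := by
  funext i j; simp only [segH, pvMSet]; split_ifs <;> first | trivial | rfl | omega | (exfalso; omega)

lemma segHrev_step (mat : Int → Int → Int) (t l r num : Int) (h : l ≤ r) :
    segHrev (pvMSet mat t r num) t l (r - 1) (num + 1) = segHrev mat t l r num := by
  funext i j; simp only [segHrev, pvMSet]; split_ifs <;> first | trivial | rfl | omega | (exfalso; omega)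

lemma segV_step (mat : Int → Int → Int) (c t b num : Int) (h : t ≤ b) :
    segV (pvMSet mat t c num) c (t + 1) b (num + 1) = segV mat c t b num := by
  funext i j; simp only [segV, pvMSet]; split_ifs <;> first | trivial | rfl | omega | (exfalso; omega)

lemma segVrev_step (mat : Int → Int → Int) (c t b num : Int) (h : t ≤ b) :
    segVrev (pvMSet mat b c num) c t (b - 1) (num + 1) = segVrev mat c t b num := by
  funext i j; simp only [segVrev, pvMSet]; split_ifs <;> first | trivial | rfl | omega | (exfalso; omega)

lemma posH_step (pos : Int → Option (Int × Int)) (t l r num : Int) (h : l ≤ r) :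
    posH (pvPSet pos (num - 1) (t, l)) t (l + 1) r (num + 1) = posH pos t l r num := by
  funext v; simp only [posH, pvPSet]
  split_ifs <;> first | rfl | (exfalso; omega) | (simp only [Option.some.injEq, Prod.mk.injEq, true_and, and_true]; first | trivial | omega)

lemma posHrev_step (pos : Int → Option (Int × Int)) (t l r num : Int) (h : l ≤ r) :
    posHrev (pvPSet pos (num - 1) (t, r)) t l (r - 1) (num + 1) = posHrev pos t l r num := by
  funext v; simp only [posHrev, pvPSet]
  split_ifs <;> first | rfl | (exfalso; omega) | (simp only [Option.some.injEq, Prod.mk.injEq, true_and, and_true]; first | trivial | omega)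

lemma posV_step (pos : Int → Option (Int × Int)) (c t b num : Int) (h : t ≤ b) :
    posV (pvPSet pos (num - 1) (t, c)) c (t + 1) b (num + 1) = posV pos c t b num := by
  funext v; simp only [posV, pvPSet]
  split_ifs <;> first | rfl | (exfalso; omega) | (simp only [Option.some.injEq, Prod.mk.injEq, true_and, and_true]; first | trivial | omega)

lemma posVrev_step (pos : Int → Option (Int × Int)) (c t b num : Int) (h : t ≤ b) :
    posVrev (pvPSet pos (num - 1) (b, c)) c t (b - 1) (num + 1) = posVrev pos c t b num := by
  funext v; simp only [posVrev, pvPSet]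
  split_ifs <;> first | rfl | (exfalso; omega) | (simp only [Option.some.injEq, Prod.mk.injEq, true_and, and_true]; first | trivial | omega)

lemma segHrev_empty (mat : Int → Int → Int) (t l r num : Int) (h : r < l) : segHrev mat t l r num = mat := by
  funext i j; simp only [segHrev]; split_ifs with h1
  · omega
  · rfl
lemma posH_empty (pos : Int → Option (Int × Int)) (t l r num : Int) (h : r < l) : posH pos t l r num = pos := by
  funext v; simp only [posH]; split_ifs with h1
  · omega
  · rfl
lemma posHrev_empty (pos : Int → Option (Int × Int)) (t l r num : Int) (h : r < l) : posHrev pos t l r num = pos := by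
  funext v; simp only [posHrev]; split_ifs with h1
  · omega
  · rfl
lemma posV_empty (pos : Int → Option (Int × Int)) (c t b num : Int) (h : b < t) : posV pos c t b num = pos := by
  funext v; simp only [posV]; split_ifs with h1
  · omega
  · rfl
lemma posVrev_empty (pos : Int → Option (Int × Int)) (c t b num : Int) (h : b < t) : posVrev pos c t b num = pos := by
  funext v; simp only [posVrev]; split_ifs with h1
  · omega
  · rfl

-- ---- A's four scans compute seg/pos overrides ----
lemma rowScan_fwd (size : Int) : ∀ (len fuel : Nat) (mat : Int → Int → Int)
    (pos : Int → Option (Int × Int)) (row l r num : Int),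
    (r + 1 - l).toNat = len → len < fuel → 0 ≤ l → l ≤ r + 1 → r < size →
    (∀ j, l ≤ j → j ≤ r → mat row j = 0) →
    (size ≤ r + 1 ∨ mat row (r + 1) ≠ 0) →
    pvRowScan size fuel mat pos row l 1 num =
      (segH mat row l r num, posH pos row l r num, r + 1, num + (r + 1 - l)) := by
  intro len
  induction len with
  | zero =>
    intro fuel mat pos row l r num hlen hfuel h0 hlr hr hz hstop
    have hl : l = r + 1 := by omega
    subst hl
    obtain ⟨f, rfl⟩ : ∃ f, fuel = f + 1 := ⟨fuel - 1, by omega⟩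
    simp only [pvRowScan]
    rw [if_neg (by rintro ⟨h1, h2, h3⟩; rcases hstop with h | h; exacts [absurd h2 (by omega), h h3])]
    rw [segH_empty mat row (r + 1) r num (by omega), posH_empty pos row (r + 1) r num (by omega)]
    simp only [Prod.mk.injEq, true_and, and_true]
    try first | trivial | omega | ring
  | succ k ih =>
    intro fuel mat pos row l r num hlen hfuel h0 hlr hr hz hstop
    have hlr' : l ≤ r := by omega
    obtain ⟨f, rfl⟩ : ∃ f, fuel = f + 1 := ⟨fuel - 1, by omega⟩
    simp only [pvRowScan]
    rw [if_pos ⟨h0, by omega, hz l le_rfl (by omega)⟩]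
    rw [ih f _ _ row (l + 1) r (num + 1) (by omega) (by omega) (by omega) (by omega) hr
      (by intro j hj1 hj2; simp only [pvMSet]; rw [if_neg (by omega)]; exact hz j (by omega) hj2)
      (by rcases hstop with h | h
          · exact Or.inl h
          · exact Or.inr (by simp only [pvMSet]; rw [if_neg (by omega)]; exact h))]
    rw [segH_step mat row l r num hlr', posH_step pos row l r num hlr']
    simp only [Prod.mk.injEq, true_and, and_true]
    try first | trivial | omega | ring


lemma rowScan_rev (size : Int) : ∀ (len fuel : Nat) (mat : Int → Int → Int)
    (pos : Int → Option (Int × Int)) (row l r num : Int),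
    (r + 1 - l).toNat = len → len < fuel → 0 ≤ l → l ≤ r + 1 → r < size →
    (∀ j, l ≤ j → j ≤ r → mat row j = 0) →
    (l - 1 < 0 ∨ mat row (l - 1) ≠ 0) →
    pvRowScan size fuel mat pos row r (-1) num =
      (segHrev mat row l r num, posHrev pos row l r num, l - 1, num + (r + 1 - l)) := by
  intro len
  induction len with
  | zero =>
    intro fuel mat pos row l r num hlen hfuel h0 hlr hr hz hstop
    have hl : l = r + 1 := by omega
    subst hl
    obtain ⟨f, rfl⟩ : ∃ f, fuel = f + 1 := ⟨fuel - 1, by omega⟩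
    simp only [pvRowScan]
    rw [show r + 1 - 1 = r from by ring] at hstop
    rw [if_neg (by rintro ⟨h1, h2, h3⟩; rcases hstop with h | h; exacts [absurd h2 (by omega), h h3])]
    rw [segHrev_empty mat row (r + 1) r num (by omega), posHrev_empty pos row (r + 1) r num (by omega)]
    simp only [Prod.mk.injEq, true_and, and_true]
    try first | trivial | omega | ring
  | succ k ih =>
    intro fuel mat pos row l r num hlen hfuel h0 hlr hr hz hstop
    have hlr' : l ≤ r := by omega
    obtain ⟨f, rfl⟩ : ∃ f, fuel = f + 1 := ⟨fuel - 1, by omega⟩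
    simp only [pvRowScan]
    rw [if_pos ⟨by omega, by omega, hz r hlr' le_rfl⟩]
    have hrr : r + -1 = r - 1 := by ring
    rw [hrr]
    rw [ih f _ _ row l (r - 1) (num + 1) (by omega) (by omega) h0 (by omega) (by omega)
      (by intro j hj1 hj2; simp only [pvMSet]; rw [if_neg (by omega)]; exact hz j hj1 (by omega))
      (by rcases hstop with h | h
          · exact Or.inl h
          · exact Or.inr (by simp only [pvMSet]; rw [if_neg (by omega)]; exact h))]
    rw [segHrev_step mat row l r num hlr', posHrev_step pos row l r num hlr']
    simp only [Prod.mk.injEq, true_and, and_true]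
    try first | trivial | omega | ring


lemma colScan_fwd (size : Int) : ∀ (len fuel : Nat) (mat : Int → Int → Int)
    (pos : Int → Option (Int × Int)) (c t b num : Int),
    (b + 1 - t).toNat = len → len < fuel → 0 ≤ t → t ≤ b + 1 → b < size →
    (∀ i, t ≤ i → i ≤ b → mat i c = 0) →
    (size ≤ b + 1 ∨ mat (b + 1) c ≠ 0) →
    pvColScan size fuel mat pos c t 1 num =
      (segV mat c t b num, posV pos c t b num, b + 1, num + (b + 1 - t)) := by
  intro len
  induction len with
  | zero =>
    intro fuel mat pos c t b num hlen hfuel h0 hlr hr hz hstop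
    have hl : t = b + 1 := by omega
    subst hl
    obtain ⟨f, rfl⟩ : ∃ f, fuel = f + 1 := ⟨fuel - 1, by omega⟩
    simp only [pvColScan]
    rw [if_neg (by rintro ⟨h1, h2, h3⟩; rcases hstop with h | h; exacts [absurd h2 (by omega), h h3])]
    rw [segV_empty mat c (b + 1) b num (by omega), posV_empty pos c (b + 1) b num (by omega)]
    simp only [Prod.mk.injEq, true_and, and_true]
    try first | trivial | omega | ring
  | succ k ih =>
    intro fuel mat pos c t b num hlen hfuel h0 hlr hr hz hstop
    have hlr' : t ≤ b := by omega
    obtain ⟨f, rfl⟩ : ∃ f, fuel = f + 1 := ⟨fuel - 1, by omega⟩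
    simp only [pvColScan]
    rw [if_pos ⟨h0, by omega, hz t le_rfl (by omega)⟩]
    rw [ih f _ _ c (t + 1) b (num + 1) (by omega) (by omega) (by omega) (by omega) hr
      (by intro i hi1 hi2; simp only [pvMSet]; rw [if_neg (by omega)]; exact hz i (by omega) hi2)
      (by rcases hstop with h | h
          · exact Or.inl h
          · exact Or.inr (by simp only [pvMSet]; rw [if_neg (by omega)]; exact h))]
    rw [segV_step mat c t b num hlr', posV_step pos c t b num hlr']
    simp only [Prod.mk.injEq, true_and, and_true]
    try first | trivial | omega | ring


lemma colScan_rev (size : Int) : ∀ (len fuel : Nat) (mat : Int → Int → Int)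
    (pos : Int → Option (Int × Int)) (c t b num : Int),
    (b + 1 - t).toNat = len → len < fuel → 0 ≤ t → t ≤ b + 1 → b < size →
    (∀ i, t ≤ i → i ≤ b → mat i c = 0) →
    (t - 1 < 0 ∨ mat (t - 1) c ≠ 0) →
    pvColScan size fuel mat pos c b (-1) num =
      (segVrev mat c t b num, posVrev pos c t b num, t - 1, num + (b + 1 - t)) := by
  intro len
  induction len with
  | zero =>
    intro fuel mat pos c t b num hlen hfuel h0 hlr hr hz hstop
    have hl : t = b + 1 := by omega
    subst hl
    obtain ⟨f, rfl⟩ : ∃ f, fuel = f + 1 := ⟨fuel - 1, by omega⟩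
    simp only [pvColScan]
    rw [show b + 1 - 1 = b from by ring] at hstop
    rw [if_neg (by rintro ⟨h1, h2, h3⟩; rcases hstop with h | h; exacts [absurd h2 (by omega), h h3])]
    rw [segVrev_empty mat c (b + 1) b num (by omega), posVrev_empty pos c (b + 1) b num (by omega)]
    simp only [Prod.mk.injEq, true_and, and_true]
    try first | trivial | omega | ring
  | succ k ih =>
    intro fuel mat pos c t b num hlen hfuel h0 hlr hr hz hstop
    have hlr' : t ≤ b := by omega
    obtain ⟨f, rfl⟩ : ∃ f, fuel = f + 1 := ⟨fuel - 1, by omega⟩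
    simp only [pvColScan]
    rw [if_pos ⟨by omega, by omega, hz b hlr' le_rfl⟩]
    have hrr : b + -1 = b - 1 := by ring
    rw [hrr]
    rw [ih f _ _ c t (b - 1) (num + 1) (by omega) (by omega) h0 (by omega) (by omega)
      (by intro i hi1 hi2; simp only [pvMSet]; rw [if_neg (by omega)]; exact hz i hi1 (by omega))
      (by rcases hstop with h | h
          · exact Or.inl h
          · exact Or.inr (by simp only [pvMSet]; rw [if_neg (by omega)]; exact h))]
    rw [segVrev_step mat c t b num hlr', posVrev_step pos c t b num hlr']
    simp only [Prod.mk.injEq, true_and, and_true]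
    try first | trivial | omega | ring


-- ---- B's four folds compute the same seg overrides ----
lemma fold_fwdH (t : Int) : ∀ (len : Nat) (l r num : Int) (mat : Int → Int → Int),
    (r + 1 - l).toNat = len → l ≤ r + 1 →
    (PySem.List.pyRange l (r + 1) 1).foldl
      (fun (p : (Int → Int → Int) × Int) j => (pvMSet p.1 t j p.2, p.2 + 1)) (mat, num) =
    (segH mat t l r num, num + (r + 1 - l)) := by
  intro len
  induction len with
  | zero =>
    intro l r num mat hlen hlr
    rw [PySem.List.pyRange_one_eq_nil (by omega)]
    rw [segH_empty mat t l r num (by omega)]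
    simp only [List.foldl_nil]
    simp only [Prod.mk.injEq, true_and, and_true]
    try first | trivial | omega | ring
  | succ k ih =>
    intro l r num mat hlen hlr
    rw [PySem.List.pyRange_one_cons (by omega)]
    simp only [List.foldl_cons]
    rw [ih (l + 1) r (num + 1) _ (by omega) (by omega)]
    rw [segH_step mat t l r num (by omega)]
    simp only [Prod.mk.injEq, true_and, and_true]
    try first | trivial | omega | ring


lemma fold_fwdV (c : Int) : ∀ (len : Nat) (t b num : Int) (mat : Int → Int → Int),
    (b + 1 - t).toNat = len → t ≤ b + 1 →
    (PySem.List.pyRange t (b + 1) 1).foldl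
      (fun (p : (Int → Int → Int) × Int) i => (pvMSet p.1 i c p.2, p.2 + 1)) (mat, num) =
    (segV mat c t b num, num + (b + 1 - t)) := by
  intro len
  induction len with
  | zero =>
    intro t b num mat hlen hlr
    rw [PySem.List.pyRange_one_eq_nil (by omega)]
    rw [segV_empty mat c t b num (by omega)]
    simp only [List.foldl_nil]
    simp only [Prod.mk.injEq, true_and, and_true]
    try first | trivial | omega | ring
  | succ k ih =>
    intro t b num mat hlen hlr
    rw [PySem.List.pyRange_one_cons (by omega)]
    simp only [List.foldl_cons]
    rw [ih (t + 1) b (num + 1) _ (by omega) (by omega)]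
    rw [segV_step mat c t b num (by omega)]
    simp only [Prod.mk.injEq, true_and, and_true]
    try first | trivial | omega | ring


lemma fold_revH (t : Int) : ∀ (len : Nat) (l r num : Int) (mat : Int → Int → Int),
    (r + 1 - l).toNat = len → l ≤ r + 1 →
    (PySem.List.pyRange r (l - 1) (-1)).foldl
      (fun (p : (Int → Int → Int) × Int) j => (pvMSet p.1 t j p.2, p.2 + 1)) (mat, num) =
    (segHrev mat t l r num, num + (r + 1 - l)) := by
  intro len
  induction len with
  | zero =>
    intro l r num mat hlen hlr
    rw [PySem.List.pyRange_neg_one_eq_nil (by omega)]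
    rw [segHrev_empty mat t l r num (by omega)]
    simp only [List.foldl_nil]
    simp only [Prod.mk.injEq, true_and, and_true]
    try first | trivial | omega | ring
  | succ k ih =>
    intro l r num mat hlen hlr
    rw [PySem.List.pyRange_neg_one_cons (by omega)]
    simp only [List.foldl_cons]
    rw [ih l (r - 1) (num + 1) _ (by omega) (by omega)]
    rw [segHrev_step mat t l r num (by omega)]
    simp only [Prod.mk.injEq, true_and, and_true]
    try first | trivial | omega | ring


lemma fold_revV (c : Int) : ∀ (len : Nat) (t b num : Int) (mat : Int → Int → Int),
    (b + 1 - t).toNat = len → t ≤ b + 1 →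
    (PySem.List.pyRange b (t - 1) (-1)).foldl
      (fun (p : (Int → Int → Int) × Int) i => (pvMSet p.1 i c p.2, p.2 + 1)) (mat, num) =
    (segVrev mat c t b num, num + (b + 1 - t)) := by
  intro len
  induction len with
  | zero =>
    intro t b num mat hlen hlr
    rw [PySem.List.pyRange_neg_one_eq_nil (by omega)]
    rw [segVrev_empty mat c t b num (by omega)]
    simp only [List.foldl_nil]
    simp only [Prod.mk.injEq, true_and, and_true]
    try first | trivial | omega | ring
  | succ k ih =>
    intro t b num mat hlen hlr
    rw [PySem.List.pyRange_neg_one_cons (by omega)]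
    simp only [List.foldl_cons]
    rw [ih t (b - 1) (num + 1) _ (by omega) (by omega)]
    rw [segVrev_step mat c t b num (by omega)]
    simp only [Prod.mk.injEq, true_and, and_true]
    try first | trivial | omega | ring



-- one-step unfolding of the mutual recursion, given the scan's value
lemma fillRow_unfold (size k : Int) (f : Nat) (mat : Int → Int → Int)
    (pos : Int → Option (Int × Int)) (row col flag num : Int)
    (mat' : Int → Int → Int) (pos' : Int → Option (Int × Int)) (i' num' : Int)
    (hscan : pvRowScan size (size.toNat + 1) mat pos row col flag num = (mat', pos', i', num')) :
    pvFillRow size k (f + 1) mat pos row col flag num =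
      if num' > k then (mat', pos')
      else if flag = 1 then pvFillCol size k f mat' pos' (row + 1) (i' - 1) 1 num'
      else pvFillCol size k f mat' pos' (row - 1) (i' + 1) (-1) num' := by
  simp only [pvFillRow, hscan]

lemma fillCol_unfold (size k : Int) (f : Nat) (mat : Int → Int → Int)
    (pos : Int → Option (Int × Int)) (row column flag num : Int)
    (mat' : Int → Int → Int) (pos' : Int → Option (Int × Int)) (i' num' : Int)
    (hscan : pvColScan size (size.toNat + 1) mat pos column row flag num = (mat', pos', i', num')) :
    pvFillCol size k (f + 1) mat pos row column flag num =
      if num' > k then (mat', pos')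
      else if flag = -1 then pvFillRow size k f mat' pos' (i' + 1) (column + 1) 1 num'
      else pvFillRow size k f mat' pos' (i' - 1) (column - 1) (-1) num' := by
  simp only [pvFillCol, hscan]

lemma spiralLoop_stop (fB : Nat) (t b l r num : Int) (mat : Int → Int → Int)
    (h : ¬(t ≤ b ∧ l ≤ r)) : pvSpiralLoop fB t b l r num mat = mat := by
  cases fB with
  | zero => rfl
  | succ f => simp only [pvSpiralLoop]; rw [if_neg h]

lemma spiralLoop_step (fB : Nat) (t b l r num : Int) (mat : Int → Int → Int)
    (h : t ≤ b ∧ l ≤ r) :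
    pvSpiralLoop (fB + 1) t b l r num mat =
      (let s1 := (PySem.List.pyRange l (r + 1) 1).foldl
        (fun (p : (Int → Int → Int) × Int) j => (pvMSet p.1 t j p.2, p.2 + 1)) (mat, num)
      let s2 := (PySem.List.pyRange (t + 1) (b + 1) 1).foldl
        (fun (p : (Int → Int → Int) × Int) i => (pvMSet p.1 i r p.2, p.2 + 1)) s1
      let s3 := if t < b then (PySem.List.pyRange (r - 1) (l - 1) (-1)).foldl
        (fun (p : (Int → Int → Int) × Int) j => (pvMSet p.1 b j p.2, p.2 + 1)) s2 else s2
      let s4 := if l < r then (PySem.List.pyRange (b - 1) t (-1)).foldl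
        (fun (p : (Int → Int → Int) × Int) i => (pvMSet p.1 i l p.2, p.2 + 1)) s3 else s3
      pvSpiralLoop fB (t + 1) (b - 1) (l + 1) (r - 1) s4.2 s4.1) := by
  simp only [pvSpiralLoop]; rw [if_pos h]

-- ---- main layer-by-layer simulation ----
lemma spiral_main : ∀ (s : Nat), 1 ≤ s → ∀ (n m num : Int) (mat : Int → Int → Int)
    (pos : Int → Option (Int × Int)) (fuelA fuelB : Nat),
    0 ≤ m → n - 2 * m = (s : Int) →
    num = n * n - (s : Int) * (s : Int) + 1 →
    (∀ i j, m ≤ i → i ≤ n - 1 - m → m ≤ j → j ≤ n - 1 - m → mat i j = 0) →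
    (∀ i j, 0 ≤ i → i < n → 0 ≤ j → j < n →
      (i < m ∨ j < m ∨ n - 1 - m < i ∨ n - 1 - m < j) → 1 ≤ mat i j ∧ mat i j < num) →
    2 * s + 2 ≤ fuelA → s + 1 ≤ fuelB →
    (pvFillRow n (n * n) fuelA mat pos m m 1 num).1 =
        pvSpiralLoop fuelB m (n - 1 - m) m (n - 1 - m) num mat
    ∧ ∃ rr cc, (pvFillRow n (n * n) fuelA mat pos m m 1 num).2 (n * n - 1) = some (rr, cc)
        ∧ 0 ≤ rr ∧ rr < n ∧ 0 ≤ cc ∧ cc < n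
        ∧ (pvFillRow n (n * n) fuelA mat pos m m 1 num).1 rr cc = n * n
        ∧ ∀ i j, 0 ≤ i → i < n → 0 ≤ j → j < n →
            (pvFillRow n (n * n) fuelA mat pos m m 1 num).1 i j = n * n → i = rr ∧ j = cc := by
  intro s
  induction s using Nat.strong_induction_on with
  | _ s IH =>
  intro hs1 n m num mat pos fuelA fuelB hm hs hnum hzero hfill hfA hfB
  have hs1' : (1 : Int) ≤ (s : Int) := by exact_mod_cast hs1
  have hn1 : 1 ≤ n := by omega
  have hsn' : (s : Int) ≤ n := by omega
  have hss : (s : Int) * (s : Int) ≤ n * n :=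
    mul_le_mul hsn' hsn' (by omega) (by omega)
  obtain ⟨q, hqe, hq1⟩ : ∃ q, q = (s : Int) * (s : Int) ∧ (s : Int) ≤ q :=
    ⟨_, rfl, by nlinarith⟩
  obtain ⟨K, hK, hqK⟩ : ∃ K, K = n * n ∧ q ≤ K := ⟨_, rfl, by rw [hqe]; exact hss⟩
  rw [← hqe] at hnum
  rw [← hK] at hnum ⊢
  have hnum1 : 1 ≤ num := by omega
  obtain ⟨g, rfl⟩ : ∃ g, fuelA = g + 4 := ⟨fuelA - 4, by omega⟩
  obtain ⟨fB, rfl⟩ : ∃ f, fuelB = f + 1 := ⟨fuelB - 1, by omega⟩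
  -- ---- leg 1 (top row, left→right) ----
  have hscan1 := rowScan_fwd n s (n.toNat + 1) mat pos m m (n - 1 - m) num
    (by omega) (by omega) hm (by omega) (by omega)
    (fun j hj1 hj2 => hzero m j le_rfl (by omega) hj1 hj2)
    (by by_cases hm0 : m = 0
        · left; omega
        · right
          have := hfill m (n - 1 - m + 1) hm (by omega) (by omega) (by omega) (by omega)
          omega)
  have hA1 := fillRow_unfold n K (g + 3) mat pos m m 1 num _ _ _ _ hscan1
  rw [if_pos rfl] at hA1
  rw [show n - 1 - m + 1 - 1 = n - 1 - m from by ring] at hA1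
  have hf1 := fold_fwdH m s m (n - 1 - m) num mat (by omega) (by omega)
  obtain hc1 | hc2 | hc3 : s = 1 ∨ s = 2 ∨ 3 ≤ s := by omega
  · -- ================= s = 1 =================
    subst hc1
    have hq1' : q = 1 := by rw [hqe]; norm_num
    rw [if_pos (by omega)] at hA1
    have hB : pvSpiralLoop (fB + 1) m (n - 1 - m) m (n - 1 - m) num mat =
        segH mat m m (n - 1 - m) num := by
      rw [spiralLoop_step fB m (n - 1 - m) m (n - 1 - m) num mat ⟨by omega, by omega⟩]
      simp only [hf1]
      have hf2 := fold_fwdV (n - 1 - m) 0 (m + 1) (n - 1 - m) (num + (n - 1 - m + 1 - m))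
        (segH mat m m (n - 1 - m) num) (by omega) (by omega)
      simp only [hf2, segV_empty _ _ _ _ _ (by omega : n - 1 - m < m + 1)]
      rw [if_neg (by omega), if_neg (by omega)]
      exact spiralLoop_stop fB _ _ _ _ _ _ (by omega)
    rw [hA1, hB]
    refine ⟨rfl, m, m, ?_, by omega, by omega, by omega, by omega, ?_, ?_⟩
    · show posH pos m m (n - 1 - m) num (K - 1) = some (m, m)
      simp only [posH]
      rw [if_pos (by constructor <;> omega)]
      simp only [Option.some.injEq, Prod.mk.injEq, true_and, and_true]
      omega
    · show segH mat m m (n - 1 - m) num m m = K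
      simp only [segH]
      rw [if_pos (by refine ⟨?_, ?_, ?_⟩ <;> first | trivial | rfl | omega)]
      omega
    · intro i j h1 h2 h3 h4 hv
      simp only [segH] at hv
      split_ifs at hv with hw
      · omega
      · have := hfill i j h1 h2 h3 h4 (by omega)
        omega
  · -- ================= s = 2 =================
    subst hc2
    have hq2' : q = 4 := by rw [hqe]; norm_num
    rw [if_neg (by omega)] at hA1
    -- leg 2 (right column, downward)
    have hscan2 := colScan_fwd n 1 (n.toNat + 1) (segH mat m m (n - 1 - m) num)
      (posH pos m m (n - 1 - m) num) (n - 1 - m) (m + 1) (n - 1 - m) (num + (n - 1 - m + 1 - m))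
      (by omega) (by omega) (by omega) (by omega) (by omega)
      (by intro i hi1 hi2
          simp only [segH]
          rw [if_neg (by omega)]
          exact hzero i (n - 1 - m) (by omega) hi2 (by omega) le_rfl)
      (by by_cases hm0 : m = 0
          · left; omega
          · right
            simp only [segH]
            rw [if_neg (by omega)]
            have := hfill (n - 1 - m + 1) (n - 1 - m) (by omega) (by omega) (by omega) (by omega) (by omega)
            omega)
    have hA2 := fillCol_unfold n K (g + 2) _ _ (m + 1) (n - 1 - m) 1 _ _ _ _ _ hscan2
    rw [if_neg (by omega), if_neg (by norm_num),
        show n - 1 - m + 1 - 1 = n - 1 - m from by ring] at hA2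
    -- leg 3 (bottom row, right→left): fills the last cell, then num > k stops A
    have hscan3 := rowScan_rev n 1 (n.toNat + 1) (segV (segH mat m m (n - 1 - m) num) (n - 1 - m) (m + 1) (n - 1 - m) (num + (n - 1 - m + 1 - m))) (posV (posH pos m m (n - 1 - m) num) (n - 1 - m) (m + 1) (n - 1 - m) (num + (n - 1 - m + 1 - m))) (n - 1 - m) m (n - 1 - m - 1)
      (num + (n - 1 - m + 1 - m) + (n - 1 - m + 1 - (m + 1)))
      (by omega) (by omega) hm (by omega) (by omega)
      (by intro j hj1 hj2
          simp only [segV, segH]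
          rw [if_neg (by omega), if_neg (by omega)]
          exact hzero (n - 1 - m) j (by omega) le_rfl (by omega) (by omega))
      (by by_cases hm0 : m = 0
          · left; omega
          · right
            simp only [segV, segH]
            rw [if_neg (by omega), if_neg (by omega)]
            have := hfill (n - 1 - m) (m - 1) (by omega) (by omega) (by omega) (by omega) (by omega)
            omega)
    have hA3 := fillRow_unfold n K (g + 1) _ _ (n - 1 - m) (n - 1 - m - 1) (-1) _ _ _ _ _ hscan3
    rw [if_pos (by omega)] at hA3
    rw [hA1, hA2, hA3]
    -- B side
    have hB : pvSpiralLoop (fB + 1) m (n - 1 - m) m (n - 1 - m) num mat =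
        segHrev (segV (segH mat m m (n - 1 - m) num) (n - 1 - m) (m + 1) (n - 1 - m) (num + (n - 1 - m + 1 - m))) (n - 1 - m) m (n - 1 - m - 1) (num + (n - 1 - m + 1 - m) + (n - 1 - m + 1 - (m + 1))) := by
      rw [spiralLoop_step fB m (n - 1 - m) m (n - 1 - m) num mat ⟨by omega, by omega⟩]
      simp only [hf1]
      have hf2 := fold_fwdV (n - 1 - m) 1 (m + 1) (n - 1 - m) (num + (n - 1 - m + 1 - m))
        (segH mat m m (n - 1 - m) num) (by omega) (by omega)
      simp only [hf2]
      rw [if_pos (by omega : m < n - 1 - m), if_pos (by omega : m < n - 1 - m)]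
      have hf3 := fold_revH (n - 1 - m) 1 m (n - 1 - m - 1) (num + (n - 1 - m + 1 - m) + (n - 1 - m + 1 - (m + 1)))
        (segV (segH mat m m (n - 1 - m) num) (n - 1 - m) (m + 1) (n - 1 - m) (num + (n - 1 - m + 1 - m))) (by omega) (by omega)
      simp only [hf3]
      have hf4 := fold_revV m 0 (m + 1) (n - 1 - m - 1) (num + (n - 1 - m + 1 - m) + (n - 1 - m + 1 - (m + 1)) + (n - 1 - m - 1 + 1 - m))
        (segHrev (segV (segH mat m m (n - 1 - m) num) (n - 1 - m) (m + 1) (n - 1 - m) (num + (n - 1 - m + 1 - m))) (n - 1 - m) m (n - 1 - m - 1) (num + (n - 1 - m + 1 - m) + (n - 1 - m + 1 - (m + 1)))) (by omega) (by omega)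
      rw [show m + 1 - 1 = m from by ring] at hf4
      simp only [hf4, segVrev_empty _ _ _ _ _ (by omega : n - 1 - m - 1 < m + 1)]
      exact spiralLoop_stop fB _ _ _ _ _ _ (by omega)
    rw [hB]
    refine ⟨rfl, n - 1 - m, n - 1 - m - 1, ?_, by omega, by omega, by omega, by omega, ?_, ?_⟩
    · show posHrev (posV (posH pos m m (n - 1 - m) num) (n - 1 - m) (m + 1) (n - 1 - m) (num + (n - 1 - m + 1 - m))) (n - 1 - m) m (n - 1 - m - 1) (num + (n - 1 - m + 1 - m) + (n - 1 - m + 1 - (m + 1))) (K - 1) = _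
      simp only [posHrev]
      rw [if_pos (by constructor <;> omega)]
      simp only [Option.some.injEq, Prod.mk.injEq, true_and, and_true]
      omega
    · show segHrev (segV (segH mat m m (n - 1 - m) num) (n - 1 - m) (m + 1) (n - 1 - m) (num + (n - 1 - m + 1 - m))) (n - 1 - m) m (n - 1 - m - 1) (num + (n - 1 - m + 1 - m) + (n - 1 - m + 1 - (m + 1))) (n - 1 - m) (n - 1 - m - 1) = K
      simp only [segHrev]
      rw [if_pos (by refine ⟨?_, ?_, ?_⟩ <;> first | trivial | rfl | omega)]
      omega
    · intro i j h1 h2 h3 h4 hv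
      simp only [segHrev, segV, segH] at hv
      split_ifs at hv with hw3 hw2 hw1
      · omega
      · exfalso; omega
      · exfalso; omega
      · exfalso
        have := hfill i j h1 h2 h3 h4 (by omega)
        omega
  · -- ================= s ≥ 3 : one full layer, then the induction hypothesis =================
    have hs3' : (3 : Int) ≤ (s : Int) := by exact_mod_cast hc3
    have hq4 : 4 * (s : Int) - 3 ≤ q := by rw [hqe]; nlinarith
    rw [if_neg (by omega)] at hA1
    -- leg 2 (right column, downward)
    have hscan2 := colScan_fwd n (s - 1) (n.toNat + 1) (segH mat m m (n - 1 - m) num)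
      (posH pos m m (n - 1 - m) num) (n - 1 - m) (m + 1) (n - 1 - m) (num + (n - 1 - m + 1 - m))
      (by omega) (by omega) (by omega) (by omega) (by omega)
      (by intro i hi1 hi2
          simp only [segH]
          rw [if_neg (by omega)]
          exact hzero i (n - 1 - m) (by omega) hi2 (by omega) le_rfl)
      (by by_cases hm0 : m = 0
          · left; omega
          · right
            simp only [segH]
            rw [if_neg (by omega)]
            have := hfill (n - 1 - m + 1) (n - 1 - m) (by omega) (by omega) (by omega) (by omega) (by omega)
            omega)
    have hA2 := fillCol_unfold n K (g + 2) _ _ (m + 1) (n - 1 - m) 1 _ _ _ _ _ hscan2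
    rw [if_neg (by omega), if_neg (by norm_num),
        show n - 1 - m + 1 - 1 = n - 1 - m from by ring] at hA2
    -- leg 3 (bottom row, right→left)
    have hscan3 := rowScan_rev n (s - 1) (n.toNat + 1) (segV (segH mat m m (n - 1 - m) num) (n - 1 - m) (m + 1) (n - 1 - m) (num + (n - 1 - m + 1 - m))) (posV (posH pos m m (n - 1 - m) num) (n - 1 - m) (m + 1) (n - 1 - m) (num + (n - 1 - m + 1 - m))) (n - 1 - m) m (n - 1 - m - 1)
      (num + (n - 1 - m + 1 - m) + (n - 1 - m + 1 - (m + 1)))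
      (by omega) (by omega) hm (by omega) (by omega)
      (by intro j hj1 hj2
          simp only [segV, segH]
          rw [if_neg (by omega), if_neg (by omega)]
          exact hzero (n - 1 - m) j (by omega) le_rfl (by omega) (by omega))
      (by by_cases hm0 : m = 0
          · left; omega
          · right
            simp only [segV, segH]
            rw [if_neg (by omega), if_neg (by omega)]
            have := hfill (n - 1 - m) (m - 1) (by omega) (by omega) (by omega) (by omega) (by omega)
            omega)
    have hA3 := fillRow_unfold n K (g + 1) _ _ (n - 1 - m) (n - 1 - m - 1) (-1) _ _ _ _ _ hscan3
    rw [if_neg (by omega), if_neg (by norm_num), show m - 1 + 1 = m from by ring] at hA3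
    -- leg 4 (left column, upward)
    have hscan4 := colScan_rev n (s - 2) (n.toNat + 1) (segHrev (segV (segH mat m m (n - 1 - m) num) (n - 1 - m) (m + 1) (n - 1 - m) (num + (n - 1 - m + 1 - m))) (n - 1 - m) m (n - 1 - m - 1) (num + (n - 1 - m + 1 - m) + (n - 1 - m + 1 - (m + 1)))) (posHrev (posV (posH pos m m (n - 1 - m) num) (n - 1 - m) (m + 1) (n - 1 - m) (num + (n - 1 - m + 1 - m))) (n - 1 - m) m (n - 1 - m - 1) (num + (n - 1 - m + 1 - m) + (n - 1 - m + 1 - (m + 1)))) m (m + 1) (n - 1 - m - 1)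
      (num + (n - 1 - m + 1 - m) + (n - 1 - m + 1 - (m + 1)) + (n - 1 - m - 1 + 1 - m))
      (by omega) (by omega) (by omega) (by omega) (by omega)
      (by intro i hi1 hi2
          simp only [segHrev, segV, segH]
          rw [if_neg (by omega), if_neg (by omega), if_neg (by omega)]
          exact hzero i m (by omega) (by omega) le_rfl (by omega))
      (by right
          simp only [segHrev, segV, segH]
          rw [if_neg (by omega), if_neg (by omega), if_pos (by refine ⟨?_, ?_, ?_⟩ <;> first | trivial | rfl | omega)]
          omega)
    have hA4 := fillCol_unfold n K g _ _ (n - 1 - m - 1) m (-1) _ _ _ _ _ hscan4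
    rw [if_neg (by omega), if_pos rfl, show m + 1 - 1 + 1 = m + 1 from by ring] at hA4
    -- B side: one full layer produces the same four overrides
    have hB : pvSpiralLoop (fB + 1) m (n - 1 - m) m (n - 1 - m) num mat =
        pvSpiralLoop fB (m + 1) (n - 1 - m - 1) (m + 1) (n - 1 - m - 1) (num + (n - 1 - m + 1 - m) + (n - 1 - m + 1 - (m + 1)) + (n - 1 - m - 1 + 1 - m) + (n - 1 - m - 1 + 1 - (m + 1))) (segVrev (segHrev (segV (segH mat m m (n - 1 - m) num) (n - 1 - m) (m + 1) (n - 1 - m) (num + (n - 1 - m + 1 - m))) (n - 1 - m) m (n - 1 - m - 1) (num + (n - 1 - m + 1 - m) + (n - 1 - m + 1 - (m + 1)))) m (m + 1) (n - 1 - m - 1) (num + (n - 1 - m + 1 - m) + (n - 1 - m + 1 - (m + 1)) + (n - 1 - m - 1 + 1 - m))) := by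
      rw [spiralLoop_step fB m (n - 1 - m) m (n - 1 - m) num mat ⟨by omega, by omega⟩]
      simp only [hf1]
      have hf2 := fold_fwdV (n - 1 - m) (s - 1) (m + 1) (n - 1 - m) (num + (n - 1 - m + 1 - m))
        (segH mat m m (n - 1 - m) num) (by omega) (by omega)
      simp only [hf2]
      rw [if_pos (by omega : m < n - 1 - m), if_pos (by omega : m < n - 1 - m)]
      have hf3 := fold_revH (n - 1 - m) (s - 1) m (n - 1 - m - 1) (num + (n - 1 - m + 1 - m) + (n - 1 - m + 1 - (m + 1)))
        (segV (segH mat m m (n - 1 - m) num) (n - 1 - m) (m + 1) (n - 1 - m) (num + (n - 1 - m + 1 - m))) (by omega) (by omega)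
      simp only [hf3]
      have hf4 := fold_revV m (s - 2) (m + 1) (n - 1 - m - 1) (num + (n - 1 - m + 1 - m) + (n - 1 - m + 1 - (m + 1)) + (n - 1 - m - 1 + 1 - m))
        (segHrev (segV (segH mat m m (n - 1 - m) num) (n - 1 - m) (m + 1) (n - 1 - m) (num + (n - 1 - m + 1 - m))) (n - 1 - m) m (n - 1 - m - 1) (num + (n - 1 - m + 1 - m) + (n - 1 - m + 1 - (m + 1)))) (by omega) (by omega)
      rw [show m + 1 - 1 = m from by ring] at hf4
      simp only [hf4]
    -- induction hypothesis at layer m+1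
    have hcast : ((s - 2 : Nat) : Int) = (s : Int) - 2 := by omega
    have hring : ((s : Int) - 2) * ((s : Int) - 2) = q - 4 * (s : Int) + 4 := by rw [hqe]; ring
    have hIH := IH (s - 2) (by omega) (by omega) n (m + 1) (num + (n - 1 - m + 1 - m) + (n - 1 - m + 1 - (m + 1)) + (n - 1 - m - 1 + 1 - m) + (n - 1 - m - 1 + 1 - (m + 1))) (segVrev (segHrev (segV (segH mat m m (n - 1 - m) num) (n - 1 - m) (m + 1) (n - 1 - m) (num + (n - 1 - m + 1 - m))) (n - 1 - m) m (n - 1 - m - 1) (num + (n - 1 - m + 1 - m) + (n - 1 - m + 1 - (m + 1)))) m (m + 1) (n - 1 - m - 1) (num + (n - 1 - m + 1 - m) + (n - 1 - m + 1 - (m + 1)) + (n - 1 - m - 1 + 1 - m))) (posVrev (posHrev (posV (posH pos m m (n - 1 - m) num) (n - 1 - m) (m + 1) (n - 1 - m) (num + (n - 1 - m + 1 - m))) (n - 1 - m) m (n - 1 - m - 1) (num + (n - 1 - m + 1 - m) + (n - 1 - m + 1 - (m + 1)))) m (m + 1) (n - 1 - m - 1) (num + (n - 1 - m + 1 - m)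 + (n - 1 - m + 1 - (m + 1)) + (n - 1 - m - 1 + 1 - m))) g fB
      (by omega) (by omega)
      (by rw [hcast, hring, ← hK]; omega)
      (by intro i j h1 h2 h3 h4
          simp only [segVrev, segHrev, segV, segH]
          split_ifs <;>
            first
              | (exfalso; omega)
              | exact hzero i j (by omega) (by omega) (by omega) (by omega))
      (by intro i j h1 h2 h3 h4 h5
          simp only [segVrev, segHrev, segV, segH]
          split_ifs <;>
            first
              | omega
              | (have := hfill i j h1 h2 h3 h4 (by omega); omega))
      (by omega) (by omega)
    rw [show n - 1 - (m + 1) = n - 1 - m - 1 from by ring, ← hK] at hIH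
    rw [hA1, hA2, hA3, hA4, hB]
    exact hIH

-- ===== VERDICT (by name: the statement is the Claim_ definition above) =====
theorem generate_goal_puzzle_spec : Claim_equal_generate_goal_puzzle := by
  unfold Claim_equal_generate_goal_puzzle
  intro size hdom hpre
  unfold Pre_generate_goal_puzzle at hpre
  unfold Spec_generate_goal_puzzle
  have hmain := spiral_main size.toNat (by omega) size 0 1 (fun _ _ => 0) (fun _ => none)
    (2 * size.toNat + 4) (size.toNat + 1) le_rfl (by omega)
    (by rw [Int.toNat_of_nonneg (by omega : (0:Int) ≤ size)]; ring)
    (fun i j _ _ _ _ => rfl)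
    (by intro i j h1 h2 h3 h4 h5; exfalso; omega)
    (by omega) le_rfl
  rw [show size - 1 - 0 = size - 1 from by ring] at hmain
  obtain ⟨hmat, rr, cc, hpos, hr0, hrn, hc0, hcn, hval, huniq⟩ := hmain
  rw [hmat] at hval huniq
  simp only [generate_goal_puzzle, generate_goal_puzzle_alt, pow_two, hpos, hmat]
  rw [List.flatMap_def, List.flatMap_def]
  refine congrArg List.flatten (List.map_congr_left ?_)
  intro i hi
  rw [PySem.List.mem_pyRange_one] at hi
  refine List.map_congr_left ?_
  intro j hj
  rw [PySem.List.mem_pyRange_one] at hj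
  by_cases h : i = rr ∧ j = cc
  · obtain ⟨rfl, rfl⟩ := h
    simp only [pvMSet, and_self, if_true, if_pos rfl]
    rw [if_pos hval]
  · simp only [pvMSet]
    rw [if_neg h, if_neg (fun hv => h (huniq i j hi.1 hi.2 hj.1 hj.2 hv))]
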